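-- pv_equiv track=rewrite | github.com/cyphera-labs/cyphera-python | cyphera/sdk.py | _extract_passthroughs
-- ===== SOURCE A (Python) =====
-- def _extract_passthroughs(value: str, alphabet: str):
--     encryptable = ""
--     positions = []
--     chars = []
--     for i, c in enumerate(value):
--         if c in alphabet:
--             encryptable += c
--         else:
--             positions.append(i)
--             chars.append(c)
--     return encryptable, positions, chars
-- ===== SOURCE B (Python) =====
-- def _extract_passthroughs(value: str, alphabet: str):
--     allowed = set(alphabet)
--     positions = [i for i in range(len(value)) if value[i] not in allowed]
--     chars = [value[i] for i in positions]
--     segments = []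
--     prev = -1
--     for p in positions + [len(value)]:
--         segments.append(value[prev + 1:p])
--         prev = p
--     return "".join(segments), positions, chars
-- ===== Notes on version B (the rewrite author's own statement) =====
-- stated objective: alternative
-- what changed: Works in index space instead of A's fused per-char loop: builds a membership set of alphabet once, finds the passthrough positions by one index scan, then derives chars by indexing into value and encryptable by joining the slices of value between consecutive passthrough positions.
import Mathlib
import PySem

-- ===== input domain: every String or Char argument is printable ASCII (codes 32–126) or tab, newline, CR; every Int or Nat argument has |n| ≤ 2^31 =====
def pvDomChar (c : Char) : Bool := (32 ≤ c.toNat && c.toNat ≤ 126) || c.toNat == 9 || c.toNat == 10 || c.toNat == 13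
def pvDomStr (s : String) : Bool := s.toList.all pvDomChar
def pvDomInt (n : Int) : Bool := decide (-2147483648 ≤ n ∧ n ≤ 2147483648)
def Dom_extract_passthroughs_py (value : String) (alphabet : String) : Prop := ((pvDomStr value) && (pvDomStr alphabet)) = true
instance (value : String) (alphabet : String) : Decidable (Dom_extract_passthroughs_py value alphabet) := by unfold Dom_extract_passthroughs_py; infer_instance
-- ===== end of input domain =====

-- B works in index space instead of A's fused char loop: it first finds the passthrough
-- positions (against a membership set built once), then derives chars by indexing and
-- encryptable by joining the slices of value between consecutive passthrough positions
-- (a different algorithm; same observable result).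

-- ===== PORT A =====
-- One fold over enumerate(value) with the triple accumulator (encryptable, positions, chars).
-- 'c in alphabet' (single char c) is exactly char membership, ported as alphabet.toList.contains c.
-- The string accumulator is carried as its char list and packed at the end (exact: += appends one char).
def extract_passthroughs_py (value : String) (alphabet : String) : String × List Int × List String :=
  let st := (PySem.List.enumerate value.toList 0).foldl
    (fun (st : List Char × List Int × List String) ic =>
      if alphabet.toList.contains ic.2 then (st.1 ++ [ic.2], st.2.1, st.2.2)
      else (st.1, st.2.1 ++ [ic.1], st.2.2 ++ [String.mk [ic.2]]))
    ([], [], [])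
  (String.mk st.1, st.2.1, st.2.2)

-- ===== PORT B =====
-- Source B: allowed = set(alphabet); positions by an index scan; chars = [value[i] for i in positions];
-- encryptable = "".join of the slices value[prev+1:p] between consecutive passthrough positions.
-- value[i] with i always in range is ported with pyGetD (default never used); join of string
-- segments is packing the flattened char-list segments.
def extract_passthroughs_py_alt (value : String) (alphabet : String) : String × List Int × List String :=
  let cs := value.toList
  let allowed : PySem.Set Char := PySem.Set.ofList alphabet.toList
  let n : Int := cs.length
  let positions := (PySem.List.pyRange 0 n 1).filter
      (fun i => !(allowed.contains (PySem.List.pyGetD cs i ' ')))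
  let chars := positions.map (fun i => String.mk [PySem.List.pyGetD cs i ' '])
  let seg := (positions ++ [n]).foldl
      (fun (st : List (List Char) × Int) p =>
        (st.1 ++ [PySem.List.slice cs (some (st.2 + 1)) (some p)], p))
      (([] : List (List Char)), (-1 : Int))
  (String.mk seg.1.flatten, positions, chars)

-- ===== PRECONDITION & SPEC =====
def Spec_extract_passthroughs_py (value : String) (alphabet : String) (out : String × List Int × List String) : Prop := out = extract_passthroughs_py_alt value alphabet
instance (value : String) (alphabet : String) (out : String × List Int × List String) : Decidable (Spec_extract_passthroughs_py value alphabet out) := by unfold Spec_extract_passthroughs_py; infer_instance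

-- ===== CLAIM (what is proved, stated in full; the proofs are below) =====
def Claim_equal_extract_passthroughs_py : Prop := ∀ (value : String) (alphabet : String), Dom_extract_passthroughs_py value alphabet → Spec_extract_passthroughs_py value alphabet (extract_passthroughs_py value alphabet)

-- ===== LEMMAS AND PROOFS =====

-- A's fused loop, characterised componentwise.
theorem extract_foldl_inv (al : List Char) (xs : List Char) (s : Int)
    (e : List Char) (p : List Int) (cs : List String) :
    (PySem.List.enumerate xs s).foldl
      (fun (st : List Char × List Int × List String) ic =>
        if al.contains ic.2 then (st.1 ++ [ic.2], st.2.1, st.2.2)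
        else (st.1, st.2.1 ++ [ic.1], st.2.2 ++ [String.mk [ic.2]]))
      (e, p, cs)
    = (e ++ xs.filter (fun c => al.contains c),
       p ++ (PySem.List.enumerate xs s).filterMap
              (fun ic => if al.contains ic.2 then none else some ic.1),
       cs ++ xs.filterMap
              (fun c => if al.contains c then none else some (String.mk [c]))) := by
  induction xs generalizing s e p cs with
  | nil => simp [PySem.List.enumerate_nil]
  | cons x xs ih =>
      rw [PySem.List.enumerate_cons, List.foldl_cons]
      by_cases h : x ∈ al
      · rw [if_pos (by simp [h] : al.contains (s, x).2 = true), ih]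
        simp [h]
      · rw [if_neg (by simp [h] : ¬ al.contains (s, x).2 = true), ih]
        simp [h]

-- filterMap that keeps f x exactly where the test fails is map-after-filter.
theorem filterMap_ite_none (l : List α) (p : α → Bool) (f : α → β) :
    l.filterMap (fun x => if p x then none else some (f x))
      = (l.filter (fun x => !p x)).map f := by
  induction l with
  | nil => simp
  | cons x l ih => by_cases h : p x <;> simp [h, ih]

-- Reading value along an in-range index interval is the corresponding slice.
theorem map_pyGetD_pyRange_eq_slice (cs : List Char) (a b : Int)
    (h0 : 0 ≤ a) (hab : a ≤ b) (hb : b ≤ (cs.length : Int)) :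
    (PySem.List.pyRange a b 1).map (fun i => PySem.List.pyGetD cs i ' ')
      = PySem.List.slice cs (some a) (some b) := by
  rw [PySem.List.slice_toNat cs h0 (le_trans h0 hab)]
  obtain ⟨k, hk⟩ : ∃ k : Nat, b = a + k := ⟨(b - a).toNat, by omega⟩
  subst hk
  induction k generalizing a with
  | zero =>
      rw [PySem.List.pyRange_one_eq_nil (by omega : a + ((0:Nat) : Int) ≤ a)]
      simp
  | succ k ih =>
      rw [PySem.List.pyRange_one_cons (by omega : a < a + ((k+1:Nat) : Int)), List.map_cons]
      have ha' : a.toNat < cs.length := by omega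
      rw [PySem.List.pyGetD_eq_getElem cs ' ' h0 (by omega)]
      have h1 : (a + ((k+1:Nat):Int)) = (a + 1) + (k : Int) := by push_cast; ring
      rw [h1, ih (a+1) (by omega) (by omega) (by omega)]
      rw [List.drop_eq_getElem_cons ha']
      have h2 : (a+1).toNat = a.toNat + 1 := by omega
      rw [h2]
      have h4 : ((a+1) + (k:Int)).toNat - a.toNat = (((a+1) + (k:Int)).toNat - (a.toNat + 1)) + 1 := by omega
      rw [h4, List.take_succ_cons]

-- The segment-joining fold of B: for a strictly increasing list of cut positions in
-- (prev, n), the flattened segments are the chars of value at the non-cut indices above prev.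
theorem foldseg (cs : List Char) (P : List Int) (prev : Int) (acc : List (List Char))
    (hprev : 0 ≤ prev + 1) (hple : prev + 1 ≤ (cs.length : Int))
    (hP : P.Pairwise (· < ·))
    (hmem : ∀ p ∈ P, prev < p ∧ p < (cs.length : Int)) :
    ((P ++ [(cs.length : Int)]).foldl
      (fun (st : List (List Char) × Int) p =>
        (st.1 ++ [PySem.List.slice cs (some (st.2 + 1)) (some p)], p))
      (acc, prev)).1.flatten
    = acc.flatten ++ (PySem.List.pyRange (prev+1) cs.length 1).filterMap
        (fun i => if i ∈ P then none else some (PySem.List.pyGetD cs i ' ')) := by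
  induction P generalizing prev acc with
  | nil =>
      simp only [List.nil_append, List.foldl_cons, List.foldl_nil, List.flatten_append,
        List.flatten_cons, List.flatten_nil, List.append_nil]
      rw [show (fun (i : Int) => if i ∈ ([] : List Int) then none
            else some (PySem.List.pyGetD cs i ' '))
          = (fun i => some (PySem.List.pyGetD cs i ' ')) from by funext i; simp]
      rw [show (fun (i : Int) => some (PySem.List.pyGetD cs i ' '))
          = some ∘ (fun i => PySem.List.pyGetD cs i ' ') from rfl]
      rw [List.filterMap_eq_map]
      rw [map_pyGetD_pyRange_eq_slice cs (prev+1) cs.length hprev hple (le_refl _)]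
  | cons p P' ih =>
      have hpn : p < (cs.length : Int) := (hmem p (by simp)).2
      have hpp : prev < p := (hmem p (by simp)).1
      have hgt : ∀ q ∈ P', p < q := fun q hq => (List.pairwise_cons.mp hP).1 q hq
      rw [List.cons_append, List.foldl_cons]
      rw [ih p (acc ++ [PySem.List.slice cs (some (prev+1)) (some p)]) (by omega) (by omega)
        (List.pairwise_cons.mp hP).2
        (fun q hq => ⟨hgt q hq, (hmem q (by simp [hq])).2⟩)]
      rw [PySem.List.pyRange_one_append (prev+1) p cs.length (by omega) (by omega)]
      rw [PySem.List.pyRange_one_cons hpn]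
      simp only [List.filterMap_append, List.filterMap_cons, List.flatten_append,
        List.flatten_cons, List.flatten_nil, List.append_nil]
      rw [if_pos (by simp : p ∈ p :: P')]
      have e1 : (PySem.List.pyRange (prev+1) p 1).filterMap
          (fun i => if i ∈ p :: P' then none else some (PySem.List.pyGetD cs i ' '))
          = PySem.List.slice cs (some (prev+1)) (some p) := by
        rw [List.filterMap_congr (g := fun i => some (PySem.List.pyGetD cs i ' '))
          (fun i hi => by
            have := PySem.List.mem_pyRange_one.mp hi
            have : i ∉ p :: P' := by
              intro hm
              rcases List.mem_cons.mp hm with hm | hm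
              · omega
              · exact absurd (hgt i hm) (by omega)
            simp [this])]
        rw [show (fun (i : Int) => some (PySem.List.pyGetD cs i ' '))
            = some ∘ (fun i => PySem.List.pyGetD cs i ' ') from rfl]
        rw [List.filterMap_eq_map]
        exact map_pyGetD_pyRange_eq_slice cs (prev+1) p hprev (by omega) (by omega)
      have e2 : (PySem.List.pyRange (p+1) cs.length 1).filterMap
          (fun i => if i ∈ p :: P' then none else some (PySem.List.pyGetD cs i ' '))
          = (PySem.List.pyRange (p+1) cs.length 1).filterMap
          (fun i => if i ∈ P' then none else some (PySem.List.pyGetD cs i ' ')) := by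
        refine List.filterMap_congr (fun i hi => ?_)
        have := PySem.List.mem_pyRange_one.mp hi
        have hne : i ≠ p := by omega
        simp [List.mem_cons, hne]
      rw [e1, e2]
      simp

-- filterMap that keeps x itself exactly where the test fails is filter by the negation.
theorem filterMap_ite_none' (l : List α) (p : α → Bool) :
    l.filterMap (fun x => if p x then none else some x)
      = l.filter (fun x => !p x) := by
  induction l with
  | nil => simp
  | cons x l ih => by_cases h : p x <;> simp [h, ih]

-- filterMap that keeps x exactly where the test holds is filter.
theorem filterMap_ite_some (l : List α) (p : α → Bool) :
    l.filterMap (fun x => if p x then some x else none) = l.filter p := by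
  induction l with
  | nil => simp
  | cons x l ih => by_cases h : p x <;> simp [h, ih]

-- On the Set side, membership coincides with A's char-list containment test.
theorem set_contains_eq (al : List Char) (c : Char) :
    (PySem.Set.ofList al).contains c = al.contains c := by
  simp [List.contains_eq_mem, PySem.Set.mem_ofList]

-- ===== VERDICT (by name: the statement is the Claim_ definition above) =====
theorem extract_passthroughs_py_spec : Claim_equal_extract_passthroughs_py := by
  intro value alphabet _
  unfold Spec_extract_passthroughs_py extract_passthroughs_py extract_passthroughs_py_alt
  simp only [extract_foldl_inv, List.nil_append]
  set cs := value.toList with hcs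
  set al := alphabet.toList with hal
  set P := (PySem.List.pyRange 0 (cs.length : Int) 1).filter
      (fun i => !((PySem.Set.ofList al).contains (PySem.List.pyGetD cs i ' '))) with hP
  have hmemP : ∀ i : Int, i ∈ P ↔
      (0 ≤ i ∧ i < (cs.length : Int) ∧ al.contains (PySem.List.pyGetD cs i ' ') = false) := by
    intro i
    rw [hP, List.mem_filter, PySem.List.mem_pyRange_one, set_contains_eq]
    simp
    tauto
  -- positions agree
  have hpos : (PySem.List.enumerate cs 0).filterMap
      (fun ic => if al.contains ic.2 then none else some ic.1) = P := by
    rw [PySem.List.enumerate_eq_map_pyRange cs ' ', List.filterMap_map]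
    simp only [PySem.List.len_eq]
    rw [hP]
    rw [show ((fun (ic : Int × Char) => if al.contains ic.2 then none else some ic.1)
          ∘ (fun j => (j, PySem.List.pyGetD cs j ' ')))
        = (fun i : Int => if al.contains (PySem.List.pyGetD cs i ' ') then none else some i)
        from rfl]
    rw [filterMap_ite_none']
    refine List.filter_congr (fun i hi => ?_)
    rw [set_contains_eq]
  -- chars agree
  have hchars : cs.filterMap (fun c => if al.contains c then none else some (String.mk [c]))
      = P.map (fun i => String.mk [PySem.List.pyGetD cs i ' ']) := by
    conv_lhs => rw [← PySem.List.map_pyGetD_pyRange_zero' cs ' ']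
    rw [List.filterMap_map]
    rw [show ((fun (c : Char) => if al.contains c then none else some (String.mk [c]))
          ∘ (fun j => PySem.List.pyGetD cs j ' '))
        = (fun i : Int => if al.contains (PySem.List.pyGetD cs i ' ') then none
            else some (String.mk [PySem.List.pyGetD cs i ' '])) from rfl]
    rw [filterMap_ite_none _ _ (fun i => String.mk [PySem.List.pyGetD cs i ' '])]
    rw [hP]
    congr 1
    refine List.filter_congr (fun i hi => ?_)
    rw [set_contains_eq]
  -- encryptable agrees
  have henc : cs.filter (fun c => al.contains c)
      = ((P ++ [(cs.length : Int)]).foldl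
          (fun (st : List (List Char) × Int) p =>
            (st.1 ++ [PySem.List.slice cs (some (st.2 + 1)) (some p)], p))
          (([] : List (List Char)), (-1 : Int))).1.flatten := by
    rw [foldseg cs P (-1) [] (by omega) (by omega)
      (List.Pairwise.filter _ (PySem.List.pairwise_lt_pyRange_one 0 (cs.length : Int)))
      (fun p hp => by have := (hmemP p).mp hp; omega)]
    have h01 : ((-1 : Int) + 1) = 0 := by norm_num
    rw [h01]
    simp only [List.flatten_nil, List.nil_append]
    rw [List.filterMap_congr (g := fun i => if al.contains (PySem.List.pyGetD cs i ' ') then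
          some (PySem.List.pyGetD cs i ' ') else none)
      (fun i hi => by
        have hb := PySem.List.mem_pyRange_one.mp hi
        by_cases hqq : al.contains (PySem.List.pyGetD cs i ' ') = true
        · have hnp : i ∉ P := fun h => by
            have h3 := ((hmemP i).mp h).2.2
            rw [hqq] at h3
            simp at h3
          rw [if_neg hnp]; simp only [List.contains_eq_mem] at hqq; simp [of_decide_eq_true hqq]
        · have hip : i ∈ P := (hmemP i).mpr ⟨by omega, by omega, by simpa using hqq⟩
          rw [if_pos hip]; simp only [List.contains_eq_mem] at hqq; simp [of_decide_eq_false (eq_false_of_ne_true hqq)])]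
    rw [show ((fun i : Int => if al.contains (PySem.List.pyGetD cs i ' ') then
          some (PySem.List.pyGetD cs i ' ') else none))
        = ((fun c : Char => if al.contains c then some c else none)
            ∘ (fun j => PySem.List.pyGetD cs j ' ')) from rfl]
    rw [← List.filterMap_map, PySem.List.map_pyGetD_pyRange_zero' cs ' ']
    rw [filterMap_ite_some]
  exact Prod.ext (congrArg String.mk henc) (Prod.ext hpos hchars)
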